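-- pv_equiv track=rewrite | github.com/NTUST-MITLAB/itriheatmap | src/helper.py | summary_location
-- ===== SOURCE A (Python) =====
-- def summary_location(lat_list, lon_list) :
--     summary = {}
--     for lat, lon in zip(lat_list, lon_list) :
--
--         if lat not in summary :
--             summary[lat] = []
--
--         if lon not in summary[lat]:
--             summary[lat].append(lon)
--
--     return summary
-- ===== SOURCE B (Python) =====
-- def summary_location(lat_list, lon_list):
--     grouped = {}
--     for lat, lon in zip(lat_list, lon_list):
--         grouped.setdefault(lat, []).append(lon)
--     return {lat: list(dict.fromkeys(lons)) for lat, lons in grouped.items()}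
-- ===== Notes on version B (the rewrite author's own statement) =====
-- stated objective: alternative
-- what changed: B collects every lon per lat in one grouping pass and then deduplicates each group order-preservingly in a second pass, instead of A's inline membership test before each append.
import Mathlib
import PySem

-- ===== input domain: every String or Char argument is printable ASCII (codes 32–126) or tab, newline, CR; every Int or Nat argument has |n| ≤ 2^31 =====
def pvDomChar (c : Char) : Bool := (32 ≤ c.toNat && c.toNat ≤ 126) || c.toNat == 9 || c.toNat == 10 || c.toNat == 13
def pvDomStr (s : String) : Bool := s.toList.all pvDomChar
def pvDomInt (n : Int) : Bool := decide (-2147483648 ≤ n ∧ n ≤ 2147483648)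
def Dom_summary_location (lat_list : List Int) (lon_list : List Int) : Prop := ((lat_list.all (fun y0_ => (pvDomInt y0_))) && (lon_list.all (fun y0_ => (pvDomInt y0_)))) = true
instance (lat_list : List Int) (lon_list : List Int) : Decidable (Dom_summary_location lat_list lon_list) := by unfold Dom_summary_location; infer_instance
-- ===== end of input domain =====

-- B groups all lons per lat in one pass and deduplicates each group in a second pass
-- (alternative decomposition of A's inline-membership accumulation; same return value).


-- ===== PORT A =====
-- dict key membership: `lat in summary`
def pvHasKey (k : Int) : List (Int × List Int) → Bool
  | [] => false
  | (a, _) :: t => a == k || pvHasKey k t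

-- dict read: `summary[lat]` (key known present; [] as unreachable default)
def pvGetD (k : Int) : List (Int × List Int) → List Int
  | [] => []
  | (a, v) :: t => if a == k then v else pvGetD k t

-- in-place `summary[lat].append(lon)` (first matching key; appends entry if absent)
def pvAppendAt (k : Int) (x : Int) : List (Int × List Int) → List (Int × List Int)
  | [] => [(k, [x])]
  | (a, v) :: t => if a == k then (a, v ++ [x]) :: t else (a, v) :: pvAppendAt k x t

-- one iteration of A's loop body
def pvStepA (s : List (Int × List Int)) (p : Int × Int) : List (Int × List Int) :=
  let s1 := if pvHasKey p.1 s then s else s ++ [(p.1, [])]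
  if (pvGetD p.1 s1).contains p.2 then s1 else pvAppendAt p.1 p.2 s1

def summary_location (lat_list : List Int) (lon_list : List Int) : List (Int × List Int) :=
  (lat_list.zip lon_list).foldl pvStepA []

-- ===== PORT B =====
-- order-preserving dedup: `list(dict.fromkeys(lons))`
def pvDedup (v : List Int) : List Int :=
  v.foldl (fun acc x => if acc.contains x then acc else acc ++ [x]) []

def summary_location_alt (lat_list : List Int) (lon_list : List Int) : List (Int × List Int) :=
  let grouped := (lat_list.zip lon_list).foldl (fun s p => pvAppendAt p.1 p.2 s) []
  grouped.map (fun kv => (kv.1, pvDedup kv.2))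

-- ===== PRECONDITION & SPEC =====
def Spec_summary_location (lat_list : List Int) (lon_list : List Int) (out : List (Int × List Int)) : Prop := out = summary_location_alt lat_list lon_list
instance (lat_list : List Int) (lon_list : List Int) (out : List (Int × List Int)) : Decidable (Spec_summary_location lat_list lon_list out) := by unfold Spec_summary_location; infer_instance

-- ===== CLAIM (what is proved, stated in full; the proofs are below) =====
def Claim_equal_summary_location : Prop := ∀ (lat_list : List Int) (lon_list : List Int), Dom_summary_location lat_list lon_list → Spec_summary_location lat_list lon_list (summary_location lat_list lon_list)

-- ===== LEMMAS AND PROOFS =====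
-- abbreviation used only by the proofs
def pvMapD (s : List (Int × List Int)) : List (Int × List Int) :=
  s.map (fun kv => (kv.1, pvDedup kv.2))

theorem pvDedup_append (v : List Int) (x : Int) :
    pvDedup (v ++ [x]) =
      if (pvDedup v).contains x then pvDedup v else pvDedup v ++ [x] := by
  simp [pvDedup, List.foldl_append]

theorem pvHasKey_mapD (k : Int) (s : List (Int × List Int)) :
    pvHasKey k (pvMapD s) = pvHasKey k s := by
  induction s with
  | nil => rfl
  | cons h t ih => simp [pvMapD, pvHasKey] at *; rw [ih]

theorem pvGetD_mapD (k : Int) (s : List (Int × List Int)) :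
    pvGetD k (pvMapD s) = pvDedup (pvGetD k s) := by
  induction s with
  | nil => simp [pvMapD, pvGetD, pvDedup]
  | cons h t ih =>
    by_cases hk : h.1 = k
    · simp [pvMapD, pvGetD, hk]
    · simp [pvMapD, pvGetD, hk] at *; exact ih

theorem pvGetD_append_absent (k : Int) (l r : List (Int × List Int))
    (h : pvHasKey k l = false) : pvGetD k (l ++ r) = pvGetD k r := by
  induction l with
  | nil => rfl
  | cons p t ih =>
    simp [pvHasKey] at h
    simp [pvGetD, h.1, ih h.2]

theorem pvAppendAt_append_absent (k x : Int) (l r : List (Int × List Int))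
    (h : pvHasKey k l = false) :
    pvAppendAt k x (l ++ r) = l ++ pvAppendAt k x r := by
  induction l with
  | nil => rfl
  | cons p t ih =>
    simp [pvHasKey] at h
    simp [pvAppendAt, h.1, ih h.2]

theorem pvAppendAt_absent (k x : Int) (s : List (Int × List Int))
    (h : pvHasKey k s = false) : pvAppendAt k x s = s ++ [(k, [x])] := by
  induction s with
  | nil => rfl
  | cons p t ih =>
    simp [pvHasKey] at h
    simp [pvAppendAt, h.1, ih h.2]

theorem pvAppendAt_mapD (k x : Int) (s : List (Int × List Int))
    (h : (pvDedup (pvGetD k s)).contains x = false) :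
    pvAppendAt k x (pvMapD s) = pvMapD (pvAppendAt k x s) := by
  induction s with
  | nil => simp [pvMapD, pvAppendAt, pvDedup]
  | cons p t ih =>
    by_cases hk : p.1 = k
    · simp [pvGetD, hk] at h
      simp [pvMapD, pvAppendAt, hk, pvDedup_append, h]
    · simp [pvGetD, hk] at h
      simp [pvMapD, pvAppendAt, hk] at *
      exact ih h

theorem pvMapD_appendAt_contains (k x : Int) (s : List (Int × List Int))
    (h : (pvDedup (pvGetD k s)).contains x = true) :
    pvMapD (pvAppendAt k x s) = pvMapD s := by
  induction s with
  | nil => simp [pvGetD, pvDedup] at h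
  | cons p t ih =>
    by_cases hk : p.1 = k
    · simp [pvGetD, hk] at h
      simp [pvMapD, pvAppendAt, hk, pvDedup_append, h]
    · simp [pvGetD, hk] at h
      simp [pvMapD, pvAppendAt, hk] at *
      exact ih h

theorem pvStepA_mapD (s : List (Int × List Int)) (k x : Int) :
    pvStepA (pvMapD s) (k, x) = pvMapD (pvAppendAt k x s) := by
  unfold pvStepA
  by_cases hk : pvHasKey k s
  · simp only [pvHasKey_mapD, hk, if_true]
    rw [pvGetD_mapD]
    by_cases hc : (pvDedup (pvGetD k s)).contains x
    · rw [if_pos hc, pvMapD_appendAt_contains k x s hc]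
    · have hc' : (pvDedup (pvGetD k s)).contains x = false := by
        simpa using hc
      rw [if_neg (by simpa using hc'), pvAppendAt_mapD k x s hc']
  · have hk' : pvHasKey k s = false := by simp [hk]
    simp only [pvHasKey_mapD, hk', Bool.false_eq_true, if_false]
    rw [pvGetD_append_absent k _ _ (by rw [pvHasKey_mapD]; exact hk')]
    simp only [pvGetD, beq_self_eq_true, if_true, List.contains_nil,
      Bool.false_eq_true, if_false]
    rw [pvAppendAt_append_absent k x _ _ (by rw [pvHasKey_mapD]; exact hk')]
    rw [pvAppendAt_absent k x s hk']
    simp [pvMapD, pvAppendAt, pvDedup]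

theorem pvFold_mapD (ps : List (Int × Int)) (s : List (Int × List Int)) :
    ps.foldl pvStepA (pvMapD s) =
      pvMapD (ps.foldl (fun s p => pvAppendAt p.1 p.2 s) s) := by
  induction ps generalizing s with
  | nil => rfl
  | cons p t ih =>
    obtain ⟨k, x⟩ := p
    simpa [List.foldl_cons, pvStepA_mapD] using ih (pvAppendAt k x s)

-- ===== VERDICT (by name: the statement is the Claim_ definition above) =====
theorem summary_location_spec : Claim_equal_summary_location := by
  intro lat_list lon_list _
  unfold Spec_summary_location summary_location summary_location_alt
  have h := pvFold_mapD (lat_list.zip lon_list) []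
  simpa [pvMapD] using h
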